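-- pv_equiv track=rewrite | github.com/Sonali553/Count_ArrayElement | count_ArrayElement.py | count_lesserElements
-- ===== SOURCE A (Python) =====
-- def count_lesserElements(lst):
--     maxEle = min(lst)
--     for ele in lst:
--         if ele > maxEle:
--             maxEle = ele
--     c = 0
--     for ele in lst:
--         if ele == maxEle:
--             c += 1
--     return len(lst) - c
-- ===== SOURCE B (Python) =====
-- def count_lesserElements(lst):
--     curMax = lst[0]
--     cnt = 0
--     for ele in lst:
--         if ele > curMax:
--             curMax = ele
--             cnt = 1
--         elif ele == curMax:
--             cnt += 1
--     return len(lst) - cnt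
-- ===== Notes on version B (the rewrite author's own statement) =====
-- stated objective: simpler
-- what changed: Replaces A's three passes (min scan, running-max loop, equality-count loop) by a single pass maintaining the running maximum together with its multiplicity.
import Mathlib
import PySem

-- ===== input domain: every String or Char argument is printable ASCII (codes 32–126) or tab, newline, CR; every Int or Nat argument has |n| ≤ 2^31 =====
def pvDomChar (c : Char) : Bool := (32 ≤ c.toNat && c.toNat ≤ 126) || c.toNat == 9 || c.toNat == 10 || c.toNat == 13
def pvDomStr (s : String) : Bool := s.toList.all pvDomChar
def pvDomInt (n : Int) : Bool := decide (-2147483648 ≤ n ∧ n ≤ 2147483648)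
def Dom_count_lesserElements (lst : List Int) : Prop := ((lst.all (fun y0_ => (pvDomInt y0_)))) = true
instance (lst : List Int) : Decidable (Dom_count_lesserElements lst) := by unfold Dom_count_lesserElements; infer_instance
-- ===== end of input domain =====

-- B merges A's three passes (min scan, running-max loop, count loop) into one pass
-- maintaining the running maximum together with its multiplicity.

-- ===== PORT A =====
def count_lesserElements (lst : List Int) : Int :=
  match PySem.List.min? lst (fun x => x) with
  | none => 0  -- unreachable under Pre_: Python's min raises ValueError on []
  | some m0 =>
    let maxEle := lst.foldl (fun maxEle ele => if ele > maxEle then ele else maxEle) m0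
    let c := lst.foldl (fun c ele => if ele = maxEle then c + 1 else c) (0 : Int)
    (lst.length : Int) - c

-- ===== PORT B =====
def count_lesserElements_alt (lst : List Int) : Int :=
  match lst with
  | [] => 0  -- unreachable under Pre_: lst[0] raises IndexError on []
  | h :: _ =>
    let s := lst.foldl
      (fun (s : Int × Int) ele =>
        if ele > s.1 then (ele, 1)
        else if ele = s.1 then (s.1, s.2 + 1)
        else s) (h, 0)
    (lst.length : Int) - s.2

-- ===== PRECONDITION & SPEC =====
-- Pre_ excludes exactly the empty list, on which A raises ValueError (min of empty sequence).
def Pre_count_lesserElements (lst : List Int) : Prop := lst ≠ []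
instance (lst : List Int) : Decidable (Pre_count_lesserElements lst) := by unfold Pre_count_lesserElements; infer_instance
def pvWitness_count_lesserElements : List Int := [3, 1, 3, 2]

def Spec_count_lesserElements (lst : List Int) (out : Int) : Prop := out = count_lesserElements_alt lst
instance (lst : List Int) (out : Int) : Decidable (Spec_count_lesserElements lst out) := by unfold Spec_count_lesserElements; infer_instance

-- ===== CLAIM (what is proved, stated in full; the proofs are below) =====
def Claim_equal_count_lesserElements : Prop := ∀ (lst : List Int), Dom_count_lesserElements lst → Pre_count_lesserElements lst → Spec_count_lesserElements lst (count_lesserElements lst)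

-- ===== LEMMAS AND PROOFS =====

-- Running max as in A's first loop.
theorem pv_foldl_max_ge (t : List Int) (m : Int) :
    m ≤ t.foldl (fun a e => if e > a then e else a) m := by
  induction t generalizing m with
  | nil => simp
  | cons a t ih =>
    simp only [List.foldl_cons]
    split
    · exact le_trans (le_of_lt (by assumption)) (ih a)
    · exact ih m

-- A's count loop adds the count of maxEle.
theorem pv_foldl_count (t : List Int) (M c : Int) :
    t.foldl (fun c e => if e = M then c + 1 else c) c = c + (t.count M : Int) := by
  induction t generalizing c with
  | nil => simp
  | cons a t ih =>
    simp only [List.foldl_cons, List.count_cons]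
    by_cases h : a = M
    · simp [h, ih]; ring
    · simp [h, ih]

-- Invariant of B's single pass: it ends with the running max and (carry + its count).
theorem pv_b_invariant (t : List Int) (m c : Int) :
    t.foldl (fun (s : Int × Int) ele =>
        if ele > s.1 then (ele, 1)
        else if ele = s.1 then (s.1, s.2 + 1)
        else s) (m, c)
      = (t.foldl (fun a e => if e > a then e else a) m,
         (if t.foldl (fun a e => if e > a then e else a) m = m then c else 0)
           + (t.count (t.foldl (fun a e => if e > a then e else a) m) : Int)) := by
  induction t generalizing m c with
  | nil => simp
  | cons a t ih =>
    simp only [List.foldl_cons]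
    by_cases hgt : a > m
    · simp only [if_pos hgt, ih a 1]
      have hM := pv_foldl_max_ge t a
      have hne : t.foldl (fun a e => if e > a then e else a) a ≠ m := by omega
      simp only [if_neg hne, List.count_cons, Prod.mk.injEq, true_and]
      by_cases he : t.foldl (fun a e => if e > a then e else a) a = a
      · simp [he]; omega
      · have hne2 : ¬ (a = t.foldl (fun a e => if e > a then e else a) a) :=
          fun h => he h.symm
        simp [he, hne2]
    · simp only [if_neg hgt]
      have hM := pv_foldl_max_ge t m
      by_cases heq : a = m
      · simp only [if_pos heq, ih m (c + 1), List.count_cons, Prod.mk.injEq, true_and]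
        by_cases hm : t.foldl (fun a e => if e > a then e else a) m = m
        · simp [hm, heq]; ring
        · have hne2 : ¬ (a = t.foldl (fun a e => if e > a then e else a) m) :=
          fun h => hm (heq ▸ h.symm)
          simp [hm, hne2]
      · simp only [if_neg heq, ih m c, List.count_cons, Prod.mk.injEq, true_and]
        have hale : a ≤ m := by omega
        have hne2 : ¬ (a = t.foldl (fun a e => if e > a then e else a) m) :=
          fun h => heq (le_antisymm hale (by rw [h]; exact hM))
        simp [hne2]

-- min(lst) ≤ first element (PySem min? on h :: t is the running-min fold).
theorem pv_min_le_head (h : Int) (t : List Int) (m0 : Int)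
    (hm : PySem.List.min? (h :: t) (fun x => x) = some m0) : m0 ≤ h :=
  PySem.List.min?_isMin hm h (by simp)

-- ===== VERDICT (by name: the statement is the Claim_ definition above) =====
theorem count_lesserElements_spec : Claim_equal_count_lesserElements := by
  intro lst _ hpre
  unfold Spec_count_lesserElements count_lesserElements count_lesserElements_alt
  match lst with
  | [] => exact absurd rfl hpre
  | h :: t =>
    cases hm : PySem.List.min? (h :: t) (fun x => x) with
    | none => simp [PySem.List.min?_eq_none_iff] at hm
    | some m0 =>
      simp only
      have hm0h : m0 ≤ h := pv_min_le_head h t m0 hm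
      -- A's running max from m0 over h :: t equals the fold from h over t
      have hA : (h :: t).foldl (fun a e => if e > a then e else a) m0
          = t.foldl (fun a e => if e > a then e else a) h := by
        simp only [List.foldl_cons]
        by_cases hgt : h > m0
        · rw [if_pos hgt]
        · rw [if_neg hgt]
          have : h = m0 := by omega
          rw [this]
      rw [pv_b_invariant (h :: t) h 0, hA, pv_foldl_count]
      simp
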